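-- pv_equiv track=rewrite | github.com/NOAA-GSD/adb_graphics | tests/test_common.py | is_a_level
-- ===== SOURCE A (Python) =====
-- from string import digits, ascii_letters
--
-- def is_a_level(key):
--
--     '''
--     Returns true if the key fits one of the level descriptor formats.
--
--     Allowable formats include:
--
--         [str_descriptor]     e.g. sfc, max, mup
--         [numeric][lev_type]  e.g. 500mb, or 2m
--         [stat][numeric]      e.g. mn02, mx25
--
--     '''
--
--     allowed_levels = [
--             'esbl',    # ???
--             'esblmn',  # ???
--             'max',     # maximum in column
--             'maxsfc',  # max surface value
--             'mdn',     # maximum downward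
--             'mnsfc',   # min surface value
--             'mup',     # maximum upward
--             'sfc',     # surface
--             'ua',      # upper air
--             ]
--
--     allowed_lev_type = [
--             'cm',      # centimeters
--             'ds',      # difference
--             'm',       # meters
--             'mb',      # milibars
--             ]
--
--     allowed_stat = [
--             'in',      # ???
--             'm',       # ???
--             'maxm',    # ???
--             'mn',      # minimum
--             'mx',      # maximum
--             ]
--
--     # Easy check first -- it is in the allowed_levels list
--     if key in allowed_levels:
--         return True
--
--     # Check for [numeric][lev_type] pattern
--     for lev in allowed_lev_type:
--         ks = key.split(lev)
--
--         # If the lev didn't appear in the key, lenght of list is 1.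
--         # If the lev didn't match exactly, the second element will the remainder of the string
--         if len(ks) == 2 and len(ks[1]) == 0:
--             numeric = ks[0].isnumeric()
--             allowed = ''.join([c for c in key if c in ascii_letters]) in allowed_lev_type
--
--             if numeric and allowed:
--                 return True
--
--     # Check for [stat][numeric]
--     for stat in allowed_stat:
--         ks = key.split(stat)
--         if len(ks) == 2 and len(ks[0]) == 0:
--
--             numeric = ks[1].isnumeric()
--             allowed = ''.join([c for c in key if c in ascii_letters]) in allowed_stat
--
--             if numeric and allowed:
--                 return True
--
--     return False
-- ===== SOURCE B (Python) =====
-- def is_a_level(key):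
--     '''Returns true if the key fits one of the level descriptor formats.
--     Instead of splitting the key on every table entry, try every split
--     point of the key once and test the two halves against the tables.'''
--     allowed_levels = {'esbl', 'esblmn', 'max', 'maxsfc', 'mdn', 'mnsfc', 'mup', 'sfc', 'ua'}
--     allowed_lev_type = {'cm', 'ds', 'm', 'mb'}
--     allowed_stat = {'in', 'm', 'maxm', 'mn', 'mx'}
--
--     if key in allowed_levels:
--         return True
--
--     for i in range(len(key) + 1):
--         pre, suf = key[:i], key[i:]
--         if pre.isnumeric() and suf in allowed_lev_type:
--             return True
--         if pre in allowed_stat and suf.isnumeric():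
--             return True
--     return False
-- ===== Notes on version B (the rewrite author's own statement) =====
-- stated objective: simpler
-- what changed: Instead of splitting the key on every entry of each table and re-filtering the key's letters per match, B tries each split point of the key once and tests the two halves directly: prefix numeric + suffix in the lev_type set, or prefix in the stat set + suffix numeric.
import Mathlib
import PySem

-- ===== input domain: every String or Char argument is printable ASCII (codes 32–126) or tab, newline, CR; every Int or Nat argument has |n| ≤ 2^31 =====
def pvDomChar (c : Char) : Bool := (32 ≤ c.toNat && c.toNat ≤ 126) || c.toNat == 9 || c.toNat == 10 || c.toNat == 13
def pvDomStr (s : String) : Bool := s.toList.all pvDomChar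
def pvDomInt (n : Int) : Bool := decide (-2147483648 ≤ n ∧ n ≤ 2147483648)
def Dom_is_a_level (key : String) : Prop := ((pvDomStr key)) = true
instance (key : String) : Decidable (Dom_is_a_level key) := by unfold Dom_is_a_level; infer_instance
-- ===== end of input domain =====

-- B replaces A's per-table split loops by one loop over the split points of the key,
-- testing the two halves against the tables directly (objective: simpler).
-- Equivalence is proved for every string.

-- ===== PORT A =====
-- `str.isnumeric` is ported as PySem.Chars.strIsdigit and `c in ascii_letters` as list
-- membership of the char: both exact on the printable-ASCII domain.
def pvAsciiLetters : List Char :=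
  ['a', 'b', 'c', 'd', 'e', 'f', 'g', 'h', 'i', 'j', 'k', 'l', 'm', 'n', 'o', 'p', 'q', 'r', 's', 't', 'u', 'v', 'w', 'x', 'y', 'z', 'A', 'B', 'C', 'D', 'E', 'F', 'G', 'H', 'I', 'J', 'K', 'L', 'M', 'N', 'O', 'P', 'Q', 'R', 'S', 'T', 'U', 'V', 'W', 'X', 'Y', 'Z']

def pvAllowedLevels : List (List Char) :=
  [['e', 's', 'b', 'l'], ['e', 's', 'b', 'l', 'm', 'n'], ['m', 'a', 'x'], ['m', 'a', 'x', 's', 'f', 'c'], ['m', 'd', 'n'], ['m', 'n', 's', 'f', 'c'], ['m', 'u', 'p'], ['s', 'f', 'c'], ['u', 'a']]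

def pvAllowedLevType : List (List Char) :=
  [['c', 'm'], ['d', 's'], ['m'], ['m', 'b']]

def pvAllowedStat : List (List Char) :=
  [['i', 'n'], ['m'], ['m', 'a', 'x', 'm'], ['m', 'n'], ['m', 'x']]

-- one iteration of A's `for lev in allowed_lev_type` loop body (returns True / falls through)
def pvLevCheck (ks lev : List Char) : Bool :=
  if (PySem.Chars.splitOn ks lev).length == 2 &&
      ((PySem.Chars.splitOn ks lev).getD 1 []).length == 0 then
    PySem.Chars.strIsdigit ((PySem.Chars.splitOn ks lev).getD 0 []) &&
      pvAllowedLevType.contains (ks.filter (fun c => pvAsciiLetters.contains c))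
  else false

-- one iteration of A's `for stat in allowed_stat` loop body
def pvStatCheck (ks stat : List Char) : Bool :=
  if (PySem.Chars.splitOn ks stat).length == 2 &&
      ((PySem.Chars.splitOn ks stat).getD 0 []).length == 0 then
    PySem.Chars.strIsdigit ((PySem.Chars.splitOn ks stat).getD 1 []) &&
      pvAllowedStat.contains (ks.filter (fun c => pvAsciiLetters.contains c))
  else false

def is_a_level (key : String) : Bool :=
  if pvAllowedLevels.contains key.toList then true
  else if pvAllowedLevType.any (pvLevCheck key.toList) then true
  else if pvAllowedStat.any (pvStatCheck key.toList) then true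
  else false

-- ===== PORT B =====
-- Source B's three Python sets, as PySem.Set
def pvLevelsSetB : PySem.Set (List Char) :=
  PySem.Set.ofList (["esbl", "esblmn", "max", "maxsfc", "mdn", "mnsfc", "mup", "sfc", "ua"].map String.toList)

def pvLevTypeSetB : PySem.Set (List Char) :=
  PySem.Set.ofList (["cm", "ds", "m", "mb"].map String.toList)

def pvStatSetB : PySem.Set (List Char) :=
  PySem.Set.ofList (["in", "m", "maxm", "mn", "mx"].map String.toList)

-- `for i in range(len(key)+1): pre, suf = key[:i], key[i:]; …` — an early-return loop = List.any;
-- key[:i] / key[i:] with 0 ≤ i are take/drop.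
def is_a_level_alt (key : String) : Bool :=
  if PySem.Set.contains pvLevelsSetB key.toList then true
  else
    (PySem.List.pyRange 0 ((key.toList.length : Int) + 1) 1).any (fun i =>
      (PySem.Chars.strIsdigit (key.toList.take i.toNat) &&
        PySem.Set.contains pvLevTypeSetB (key.toList.drop i.toNat)) ||
      (PySem.Set.contains pvStatSetB (key.toList.take i.toNat) &&
        PySem.Chars.strIsdigit (key.toList.drop i.toNat)))

-- ===== PRECONDITION & SPEC =====
def Spec_is_a_level (key : String) (out : Bool) : Prop := out = is_a_level_alt key
instance (key : String) (out : Bool) : Decidable (Spec_is_a_level key out) := by unfold Spec_is_a_level; infer_instance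

-- ===== CLAIM (what is proved, stated in full; the proofs are below) =====
def Claim_equal_is_a_level : Prop := ∀ (key : String), Dom_is_a_level key → Spec_is_a_level key (is_a_level key)

-- ===== LEMMAS AND PROOFS =====

-- splitOn.go one-step equations
theorem pv_go_zero (sep l cur : List Char) (acc : List (List Char)) :
    PySem.Chars.splitOn.go sep 0 l cur acc = ((cur.reverse ++ l) :: acc).reverse := by
  rw [PySem.Chars.splitOn.go]

theorem pv_go_nil (sep cur : List Char) (acc : List (List Char)) (fuel : Nat) :
    PySem.Chars.splitOn.go sep (fuel + 1) [] cur acc = (cur.reverse :: acc).reverse := by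
  rw [PySem.Chars.splitOn.go]; omega

theorem pv_go_cons (sep cur : List Char) (c : Char) (rest : List Char) (acc : List (List Char)) (fuel : Nat) :
    PySem.Chars.splitOn.go sep (fuel + 1) (c :: rest) cur acc =
      if sep.isPrefixOf (c :: rest) then
        PySem.Chars.splitOn.go sep fuel ((c :: rest).drop sep.length) [] (cur.reverse :: acc)
      else PySem.Chars.splitOn.go sep fuel rest (c :: cur) acc := by
  rw [PySem.Chars.splitOn.go]

theorem pv_go_match (sep l cur : List Char) (acc : List (List Char)) (fuel : Nat)
    (hsep : sep ≠ []) (hp : sep.isPrefixOf l) :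
    PySem.Chars.splitOn.go sep (fuel + 1) l cur acc
      = PySem.Chars.splitOn.go sep fuel (l.drop sep.length) [] (cur.reverse :: acc) := by
  cases l with
  | nil =>
      obtain ⟨t, ht⟩ := List.isPrefixOf_iff_prefix.mp hp
      cases sep with
      | nil => exact absurd rfl hsep
      | cons a b => simp at ht
  | cons c rest => rw [pv_go_cons, if_pos hp]

-- glue the pieces of a splitOn result back together
def pvRejoin (sep : List Char) : List (List Char) → List Char
  | [] => []
  | [p] => p
  | p :: q :: rest => p ++ sep ++ pvRejoin sep (q :: rest)

theorem pvRejoin_append_singleton (sep b : List Char) (R : List (List Char)) :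
    pvRejoin sep (R ++ [b]) = R.flatMap (fun a => a ++ sep) ++ b := by
  induction R with
  | nil => simp [pvRejoin]
  | cons r R' ih =>
      cases R' with
      | nil => simp [pvRejoin]
      | cons q rest =>
          have e1 : pvRejoin sep ((r :: q :: rest) ++ [b])
              = r ++ sep ++ pvRejoin sep ((q :: rest) ++ [b]) := rfl
          rw [e1, ih]
          simp [List.flatMap_cons, List.append_assoc]

theorem pv_go_rejoin (sep : List Char) (fuel : Nat) :
    ∀ (l cur : List Char) (acc : List (List Char)),
      pvRejoin sep (PySem.Chars.splitOn.go sep fuel l cur acc)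
        = acc.reverse.flatMap (fun a => a ++ sep) ++ cur.reverse ++ l := by
  induction fuel with
  | zero =>
      intro l cur acc
      rw [pv_go_zero]
      rw [show ((cur.reverse ++ l) :: acc).reverse = acc.reverse ++ [cur.reverse ++ l] by simp]
      rw [pvRejoin_append_singleton]
      simp [List.append_assoc]
  | succ fuel ih =>
      intro l cur acc
      cases l with
      | nil =>
          rw [pv_go_nil]
          rw [show (cur.reverse :: acc).reverse = acc.reverse ++ [cur.reverse] by simp]
          rw [pvRejoin_append_singleton]
          simp
      | cons c rest =>
          rw [pv_go_cons]
          by_cases hp : sep.isPrefixOf (c :: rest)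
          · rw [if_pos hp, ih]
            obtain ⟨t, ht⟩ := List.isPrefixOf_iff_prefix.mp hp
            have hdrop : (c :: rest).drop sep.length = t := by rw [← ht, List.drop_left]
            rw [hdrop]
            rw [show (cur.reverse :: acc).reverse = acc.reverse ++ [cur.reverse] by simp]
            rw [List.flatMap_append]
            simp [← ht, List.append_assoc]
          · rw [if_neg hp, ih]
            simp [List.append_assoc]

theorem pv_splitOn_rejoin (sep cs : List Char) :
    pvRejoin sep (PySem.Chars.splitOn cs sep) = cs := by
  rw [PySem.Chars.splitOn, pv_go_rejoin]
  simp

theorem pv_go_no_occ (sep : List Char) (fuel : Nat) :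
    ∀ (l cur : List Char) (acc : List (List Char)),
      (∀ p, ¬ sep <+: l.drop p) →
      PySem.Chars.splitOn.go sep fuel l cur acc = ((cur.reverse ++ l) :: acc).reverse := by
  induction fuel with
  | zero => intro l cur acc _; rw [pv_go_zero]
  | succ fuel ih =>
      intro l cur acc h
      cases l with
      | nil => rw [pv_go_nil]; simp
      | cons c rest =>
          rw [pv_go_cons]
          have hp : ¬ sep.isPrefixOf (c :: rest) := by
            rw [List.isPrefixOf_iff_prefix]
            simpa using h 0
          rw [if_neg hp, ih rest (c :: cur) acc (fun p => by simpa using h (p + 1))]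
          simp

theorem pv_go_consume (sep : List Char) :
    ∀ (x l' cur : List Char) (acc : List (List Char)) (fuel : Nat),
      (∀ p, p < x.length → ¬ sep <+: ((x ++ l').drop p)) →
      PySem.Chars.splitOn.go sep (fuel + x.length) (x ++ l') cur acc
        = PySem.Chars.splitOn.go sep fuel l' (x.reverse ++ cur) acc := by
  intro x
  induction x with
  | nil => intro l' cur acc fuel _; simp
  | cons c t ih =>
      intro l' cur acc fuel h
      have hstep : fuel + (c :: t).length = (fuel + t.length) + 1 := by
        rw [List.length_cons]; omega
      rw [hstep, List.cons_append, pv_go_cons]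
      have hp : ¬ sep.isPrefixOf (c :: (t ++ l')) := by
        rw [List.isPrefixOf_iff_prefix]
        simpa using h 0 (by simp)
      rw [if_neg hp]
      rw [ih l' (c :: cur) acc fuel (fun p hp' => by simpa using h (p + 1) (by simpa using hp'))]
      simp

theorem pv_splitOn_boundary (sep x y : List Char) (hsep : sep ≠ [])
    (hocc : ∀ p, p ≠ x.length → ¬ sep <+: ((x ++ (sep ++ y)).drop p)) :
    PySem.Chars.splitOn (x ++ (sep ++ y)) sep = [x, y] := by
  have hs0 : 0 < sep.length := by cases sep with
    | nil => exact absurd rfl hsep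
    | cons a b => simp
  have hY : ∀ p, ¬ sep <+: y.drop p := by
    intro p hcon
    apply hocc (x.length + sep.length + p) (by omega)
    have hdd : (x ++ (sep ++ y)).drop (x.length + sep.length + p) = y.drop p := by
      rw [← List.append_assoc]
      rw [show x.length + sep.length + p = (x ++ sep).length + p by simp]
      rw [List.drop_append]
      rw [List.drop_eq_nil_of_le (by omega)]
      simp
    rw [hdd]
    exact hcon
  rw [PySem.Chars.splitOn]
  have hlen : (x ++ (sep ++ y)).length + 1 = ((sep.length + y.length + 1) + x.length) := by
    simp; omega
  rw [hlen, pv_go_consume sep x (sep ++ y) [] [] _ (fun p hp => hocc p (by omega))]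
  rw [show sep.length + y.length + 1 = (sep.length + y.length) + 1 by rfl]
  rw [pv_go_match sep (sep ++ y) _ _ _ hsep (List.isPrefixOf_iff_prefix.mpr ⟨y, rfl⟩)]
  rw [List.drop_left]
  rw [pv_go_no_occ sep _ y _ _ hY]
  simp

-- the only place a letters-only separator can occur in [no-letters] ++ sep ++ [no-letters]
-- is at the boundary
theorem pv_no_occ_mid (sep x y : List Char)
    (hsep : sep ≠ [])
    (hsepP : ∀ c ∈ sep, pvAsciiLetters.contains c = true)
    (hx : ∀ c ∈ x, pvAsciiLetters.contains c = false)
    (hy : ∀ c ∈ y, pvAsciiLetters.contains c = false) :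
    ∀ p, p ≠ x.length → ¬ sep <+: ((x ++ (sep ++ y)).drop p) := by
  intro p hne hpre
  obtain ⟨t, ht⟩ := hpre
  have hs0 : 0 < sep.length := by cases sep with
    | nil => exact absurd rfl hsep
    | cons a b => simp
  have K : ∀ (k : Nat) (hk : k < sep.length),
      (x ++ (sep ++ y))[p + k]? = some (sep[k]'hk) := by
    intro k hk
    have h1 : (x ++ (sep ++ y))[p + k]? = ((x ++ (sep ++ y)).drop p)[k]? := by
      rw [List.getElem?_drop]
    rw [h1, ← ht, List.getElem?_append_left hk, List.getElem?_eq_getElem hk]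
  rcases Nat.lt_or_ge p x.length with hplt | hpge
  · have h0 := K 0 hs0
    rw [Nat.add_zero, List.getElem?_append_left hplt, List.getElem?_eq_getElem hplt] at h0
    have hmemx : x[p] ∈ x := List.getElem_mem _
    have hmemsep : sep[0]'hs0 ∈ sep := List.getElem_mem _
    have := hx _ hmemx
    rw [Option.some_inj.mp h0] at this
    rw [hsepP _ hmemsep] at this
    exact absurd this (by simp)
  · have hpgt : x.length < p := by omega
    rcases Nat.lt_or_ge (x.length + sep.length) p with hbig | hsmall
    · have h0 := K 0 hs0
      rw [Nat.add_zero] at h0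
      rw [List.getElem?_append_right (by omega), List.getElem?_append_right (by omega)] at h0
      have hy0 : y[p - x.length - sep.length]? = some (sep[0]'hs0) := by
        rw [← h0]
      have hm : sep[0]'hs0 ∈ y := by
        obtain ⟨hlt, heq⟩ := List.getElem?_eq_some_iff.mp hy0
        exact heq ▸ List.getElem_mem _
      have h1 := hy _ hm
      have h2 := hsepP _ (List.getElem_mem hs0)
      rw [h1] at h2; exact absurd h2 (by simp)
    · have hk : x.length + sep.length - p < sep.length := by omega
      have h0 := K _ hk
      have hidx : p + (x.length + sep.length - p) = x.length + sep.length := by omega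
      rw [hidx] at h0
      rw [List.getElem?_append_right (by omega), List.getElem?_append_right (by simp)] at h0
      have hy0 : y[0]? = some (sep[x.length + sep.length - p]'hk) := by
        rw [← h0]; congr 1; omega
      have hm : sep[x.length + sep.length - p]'hk ∈ y := by
        obtain ⟨hlt, heq⟩ := List.getElem?_eq_some_iff.mp hy0
        exact heq ▸ List.getElem_mem _
      have h1 := hy _ hm
      have h2 := hsepP _ (List.getElem_mem hk)
      rw [h1] at h2; exact absurd h2 (by simp)

-- character-class facts
theorem pv_contains_iff {α : Type} [BEq α] [LawfulBEq α] (l : List α) (c : α) :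
    l.contains c = true ↔ c ∈ l := by
  simp

theorem pv_not_mem_of_contains_false (l : List Char) (c : Char)
    (h : l.contains c = false) : c ∉ l := by
  intro hm
  rw [(pv_contains_iff l c).mpr hm] at h
  cases h

set_option maxRecDepth 8192 in
theorem pv_letters_not_digit :
    pvAsciiLetters.all (fun d => !PySem.Chars.isdigit d) = true := by decide

theorem pv_digit_not_letter (c : Char) (h : PySem.Chars.isdigit c = true) :
    pvAsciiLetters.contains c = false := by
  by_contra hcon
  rw [Bool.not_eq_false] at hcon
  have hm := (pv_contains_iff _ _).mp hcon
  have hd := List.all_eq_true.mp pv_letters_not_digit c hm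
  rw [h] at hd
  simp at hd

theorem pv_strIsdigit_iff (x : List Char) :
    PySem.Chars.strIsdigit x = true ↔ x ≠ [] ∧ ∀ c ∈ x, PySem.Chars.isdigit c = true := by
  simp [PySem.Chars.strIsdigit, List.all_eq_true]

set_option maxRecDepth 8192 in
theorem pv_levT_bool :
    pvAllowedLevType.all
      (fun s => !s.isEmpty && s.all (fun c => pvAsciiLetters.contains c)) = true := by decide

theorem pv_levT_facts :
    ∀ s ∈ pvAllowedLevType, s ≠ [] ∧ ∀ c ∈ s, pvAsciiLetters.contains c = true := by
  intro s hs
  have h := List.all_eq_true.mp pv_levT_bool s hs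
  rw [Bool.and_eq_true] at h
  exact ⟨by simpa using h.1, fun c hc => List.all_eq_true.mp h.2 c hc⟩

set_option maxRecDepth 8192 in
theorem pv_statT_bool :
    pvAllowedStat.all
      (fun s => !s.isEmpty && s.all (fun c => pvAsciiLetters.contains c)) = true := by decide

theorem pv_statT_facts :
    ∀ s ∈ pvAllowedStat, s ≠ [] ∧ ∀ c ∈ s, pvAsciiLetters.contains c = true := by
  intro s hs
  have h := List.all_eq_true.mp pv_statT_bool s hs
  rw [Bool.and_eq_true] at h
  exact ⟨by simpa using h.1, fun c hc => List.all_eq_true.mp h.2 c hc⟩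

set_option maxRecDepth 8192 in
theorem pv_levelsSetB_eq : pvLevelsSetB = pvAllowedLevels := by decide

set_option maxRecDepth 8192 in
theorem pv_levTypeSetB_eq : pvLevTypeSetB = pvAllowedLevType := by decide

set_option maxRecDepth 8192 in
theorem pv_statSetB_eq : pvStatSetB = pvAllowedStat := by decide

-- the canonical characterisations of A's two pattern checks
theorem pv_levA_iff (ks : List Char) :
    pvAllowedLevType.any (pvLevCheck ks) = true ↔
      ∃ sep x, sep ∈ pvAllowedLevType ∧ ks = x ++ sep ∧ PySem.Chars.strIsdigit x = true := by
  rw [List.any_eq_true]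
  constructor
  · rintro ⟨lev, hmem, hb⟩
    unfold pvLevCheck at hb
    split at hb
    · next hcond =>
        simp only [Bool.and_eq_true, beq_iff_eq] at hcond
        obtain ⟨a, b, hab⟩ := List.length_eq_two.mp hcond.1
        have hb0 : b = [] := by
          have := hcond.2
          rw [hab] at this
          simpa using this
        have hks : ks = a ++ lev := by
          have := pv_splitOn_rejoin lev ks
          rw [hab, hb0] at this
          simpa [pvRejoin] using this.symm
        refine ⟨lev, a, hmem, hks, ?_⟩
        have := (Bool.and_eq_true _ _).mp hb
        rw [hab] at this
        simpa using this.1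
    · exact absurd hb (by simp)
  · rintro ⟨sep, x, hmem, hks, hdig⟩
    refine ⟨sep, hmem, ?_⟩
    obtain ⟨hne, hall⟩ := pv_levT_facts sep hmem
    obtain ⟨hxne, hxdig⟩ := (pv_strIsdigit_iff x).mp hdig
    have hxlet : ∀ c ∈ x, pvAsciiLetters.contains c = false :=
      fun c hc => pv_digit_not_letter c (hxdig c hc)
    have hsplit : PySem.Chars.splitOn ks sep = [x, []] := by
      rw [hks, show x ++ sep = x ++ (sep ++ []) by simp]
      exact pv_splitOn_boundary sep x [] hne
        (pv_no_occ_mid sep x [] hne hall hxlet (by simp))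
    unfold pvLevCheck
    rw [hsplit]
    simp only [List.length_cons, List.length_nil, List.getD]
    rw [if_pos (by simp)]
    rw [hks]
    simp only [List.filter_append, Bool.and_eq_true]
    constructor
    · simpa using hdig
    · have h1 : x.filter (fun c => pvAsciiLetters.contains c) = [] :=
        List.filter_eq_nil_iff.mpr
          (fun c hc => pv_not_mem_of_contains_false _ _ (hxlet c hc) ∘ (by simpa using ·))
      have h2 : sep.filter (fun c => pvAsciiLetters.contains c) = sep :=
        List.filter_eq_self.mpr (fun c hc => hall c hc)
      rw [h1, h2, List.nil_append]
      exact (pv_contains_iff _ _).mpr hmem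

theorem pv_statA_iff (ks : List Char) :
    pvAllowedStat.any (pvStatCheck ks) = true ↔
      ∃ sep y, sep ∈ pvAllowedStat ∧ ks = sep ++ y ∧ PySem.Chars.strIsdigit y = true := by
  rw [List.any_eq_true]
  constructor
  · rintro ⟨st, hmem, hb⟩
    unfold pvStatCheck at hb
    split at hb
    · next hcond =>
        simp only [Bool.and_eq_true, beq_iff_eq] at hcond
        obtain ⟨a, b, hab⟩ := List.length_eq_two.mp hcond.1
        have ha0 : a = [] := by
          have := hcond.2
          rw [hab] at this
          simpa using this
        have hks : ks = st ++ b := by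
          have := pv_splitOn_rejoin st ks
          rw [hab, ha0] at this
          simpa [pvRejoin] using this.symm
        refine ⟨st, b, hmem, hks, ?_⟩
        have := (Bool.and_eq_true _ _).mp hb
        rw [hab] at this
        simpa using this.1
    · exact absurd hb (by simp)
  · rintro ⟨sep, y, hmem, hks, hdig⟩
    refine ⟨sep, hmem, ?_⟩
    obtain ⟨hne, hall⟩ := pv_statT_facts sep hmem
    obtain ⟨hyne, hydig⟩ := (pv_strIsdigit_iff y).mp hdig
    have hylet : ∀ c ∈ y, pvAsciiLetters.contains c = false :=
      fun c hc => pv_digit_not_letter c (hydig c hc)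
    have hsplit : PySem.Chars.splitOn ks sep = [[], y] := by
      rw [hks, show sep ++ y = [] ++ (sep ++ y) by simp]
      exact pv_splitOn_boundary sep [] y hne
        (pv_no_occ_mid sep [] y hne hall (by simp) hylet)
    unfold pvStatCheck
    rw [hsplit]
    simp only [List.length_cons, List.length_nil, List.getD]
    rw [if_pos (by simp)]
    rw [hks]
    simp only [List.filter_append, Bool.and_eq_true]
    constructor
    · simpa using hdig
    · have h1 : y.filter (fun c => pvAsciiLetters.contains c) = [] :=
        List.filter_eq_nil_iff.mpr
          (fun c hc => pv_not_mem_of_contains_false _ _ (hylet c hc) ∘ (by simpa using ·))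
      have h2 : sep.filter (fun c => pvAsciiLetters.contains c) = sep :=
        List.filter_eq_self.mpr (fun c hc => hall c hc)
      rw [h1, h2, List.append_nil]
      exact (pv_contains_iff _ _).mpr hmem

-- characterisation of B's single split-point loop
theorem pv_B_any_iff (ks : List Char) :
    ((PySem.List.pyRange 0 ((ks.length : Int) + 1) 1).any (fun i =>
      (PySem.Chars.strIsdigit (ks.take i.toNat) &&
        PySem.Set.contains pvLevTypeSetB (ks.drop i.toNat)) ||
      (PySem.Set.contains pvStatSetB (ks.take i.toNat) &&
        PySem.Chars.strIsdigit (ks.drop i.toNat))) = true) ↔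
      (∃ sep x, sep ∈ pvAllowedLevType ∧ ks = x ++ sep ∧ PySem.Chars.strIsdigit x = true) ∨
      (∃ sep y, sep ∈ pvAllowedStat ∧ ks = sep ++ y ∧ PySem.Chars.strIsdigit y = true) := by
  rw [List.any_eq_true]
  constructor
  · rintro ⟨i, hi, hb⟩
    have hsplit : ks = ks.take i.toNat ++ ks.drop i.toNat := (List.take_append_drop _ ks).symm
    rcases (Bool.or_eq_true _ _).mp hb with h | h
    · obtain ⟨h1, h2⟩ := (Bool.and_eq_true _ _).mp h
      left
      refine ⟨ks.drop i.toNat, ks.take i.toNat, ?_, hsplit, h1⟩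
      rw [PySem.Set.contains_eq_listContains, pv_levTypeSetB_eq] at h2
      exact (pv_contains_iff _ _).mp h2
    · obtain ⟨h1, h2⟩ := (Bool.and_eq_true _ _).mp h
      right
      refine ⟨ks.take i.toNat, ks.drop i.toNat, ?_, hsplit, h2⟩
      rw [PySem.Set.contains_eq_listContains, pv_statSetB_eq] at h1
      exact (pv_contains_iff _ _).mp h1
  · rintro (⟨sep, x, hmem, hks, hdig⟩ | ⟨sep, y, hmem, hks, hdig⟩)
    · refine ⟨(x.length : Int), ?_, ?_⟩
      · rw [PySem.List.mem_pyRange_one]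
        constructor
        · exact Int.natCast_nonneg _
        · have : x.length ≤ ks.length := by rw [hks]; simp
          omega
      · have ht : ((x.length : Int)).toNat = x.length := Int.toNat_natCast _
        rw [ht, hks, List.take_left, List.drop_left]
        apply Bool.or_eq_true_iff.mpr
        left
        rw [Bool.and_eq_true]
        refine ⟨hdig, ?_⟩
        rw [PySem.Set.contains_eq_listContains, pv_levTypeSetB_eq]
        exact (pv_contains_iff _ _).mpr hmem
    · refine ⟨(sep.length : Int), ?_, ?_⟩
      · rw [PySem.List.mem_pyRange_one]
        constructor
        · exact Int.natCast_nonneg _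
        · have : sep.length ≤ ks.length := by rw [hks]; simp
          omega
      · have ht : ((sep.length : Int)).toNat = sep.length := Int.toNat_natCast _
        rw [ht, hks, List.take_left, List.drop_left]
        apply Bool.or_eq_true_iff.mpr
        right
        rw [Bool.and_eq_true]
        refine ⟨?_, hdig⟩
        rw [PySem.Set.contains_eq_listContains, pv_statSetB_eq]
        exact (pv_contains_iff _ _).mpr hmem

theorem pv_port_eq (key : String) : is_a_level key = is_a_level_alt key := by
  unfold is_a_level is_a_level_alt
  have h0eq : PySem.Set.contains pvLevelsSetB key.toList = pvAllowedLevels.contains key.toList := by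
    rw [pv_levelsSetB_eq, PySem.Set.contains_eq_listContains]
  rw [h0eq]
  by_cases h0 : pvAllowedLevels.contains key.toList
  · rw [if_pos h0, if_pos h0]
  · rw [if_neg h0, if_neg h0]
    have hAB : (pvAllowedLevType.any (pvLevCheck key.toList) ||
        pvAllowedStat.any (pvStatCheck key.toList)) =
        ((PySem.List.pyRange 0 ((key.toList.length : Int) + 1) 1).any (fun i =>
          (PySem.Chars.strIsdigit (key.toList.take i.toNat) &&
            PySem.Set.contains pvLevTypeSetB (key.toList.drop i.toNat)) ||
          (PySem.Set.contains pvStatSetB (key.toList.take i.toNat) &&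
            PySem.Chars.strIsdigit (key.toList.drop i.toNat)))) := by
      rw [Bool.eq_iff_iff, Bool.or_eq_true, pv_levA_iff, pv_statA_iff, pv_B_any_iff]
    cases hLev : pvAllowedLevType.any (pvLevCheck key.toList) <;>
      cases hStat : pvAllowedStat.any (pvStatCheck key.toList) <;>
      rw [hLev, hStat] at hAB <;> simp_all

-- ===== VERDICT (by name: the statement is the Claim_ definition above) =====
theorem is_a_level_spec : Claim_equal_is_a_level := by
  intro key _
  unfold Spec_is_a_level
  exact pv_port_eq key
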